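-- pv_equiv track=rewrite | github.com/ZiqiaoZhang/FraGAT | FraGAT/Splitter.py | excludedids
-- ===== SOURCE A (Python) =====
-- def excludedids(total_num, ids):
--     excludedids = []
--     ids.sort()
--     j = 0
--     for i in range(total_num):
--         if j < len(ids):
--             if i != ids[j]:
--                 excludedids.append(i)
--             else:
--                 j += 1
--         else:
--             excludedids.append(i)
--     assert len(excludedids) + len(ids) == total_num
--     return excludedids
-- ===== SOURCE B (Python) =====
-- def excludedids(total_num, ids):
--     ids.sort()
--     id_set = set(ids)
--     exclude = [i for i in range(total_num) if i not in id_set]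
--     assert len(exclude) + len(ids) == total_num
--     return exclude
-- ===== Notes on version B (the rewrite author's own statement) =====
-- stated objective: idiomatic
-- what changed: Replaces A's sorted-merge pointer walk (index j advanced through the sorted ids while scanning range) with a direct hash-set membership filter over range(total_num); ids.sort() is kept to preserve the observable in-place mutation of the argument.
import Mathlib
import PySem

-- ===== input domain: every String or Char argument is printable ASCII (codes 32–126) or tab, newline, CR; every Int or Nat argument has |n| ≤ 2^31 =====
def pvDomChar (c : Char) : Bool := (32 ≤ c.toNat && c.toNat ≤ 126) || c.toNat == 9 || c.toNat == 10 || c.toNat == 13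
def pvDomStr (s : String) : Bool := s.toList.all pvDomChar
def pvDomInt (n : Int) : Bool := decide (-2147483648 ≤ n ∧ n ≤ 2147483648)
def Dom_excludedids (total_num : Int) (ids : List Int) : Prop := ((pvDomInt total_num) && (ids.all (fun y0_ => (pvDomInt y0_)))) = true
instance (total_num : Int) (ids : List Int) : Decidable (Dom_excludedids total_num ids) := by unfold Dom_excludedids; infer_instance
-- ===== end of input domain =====

-- B replaces A's sorted-merge pointer walk with a set-membership filter over the range; both sort
-- ids in place (A mutates its argument; the equivalence proved here is about the return value only).

-- ===== PORT A =====
-- one loop iteration: state = (excludedids, j); 'ids[j]' is guarded by 'j < len(ids)', so getD is exact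
def pvStepA (s : List Int) (st : List Int × Nat) (i : Int) : List Int × Nat :=
  if st.2 < s.length then
    (if i ≠ s.getD st.2 0 then (st.1 ++ [i], st.2) else (st.1, st.2 + 1))
  else (st.1 ++ [i], st.2)

def excludedids (total_num : Int) (ids : List Int) : List Int :=
  -- ids.sort(); then the for-loop over range(total_num); the final assert raises outside Pre_
  let s := PySem.List.sorted ids (fun x => x) false
  ((PySem.List.pyRange 0 total_num 1).foldl (pvStepA s) ([], 0)).1

-- ===== PORT B =====
def excludedids_alt (total_num : Int) (ids : List Int) : List Int :=
  let s := PySem.List.sorted ids (fun x => x) false   -- ids.sort()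
  let idSet := PySem.Set.ofList s                     -- id_set = set(ids)
  -- [i for i in range(total_num) if i not in id_set]; the final assert raises outside Pre_
  (PySem.List.pyRange 0 total_num 1).filter (fun i => !(PySem.Set.contains idSet i))

-- ===== PRECONDITION & SPEC =====
-- Pre_ excludes exactly the inputs on which A's (and B's) assert fails (AssertionError):
-- it passes iff ids has no duplicates and every id lies in range(total_num).
def Pre_excludedids (total_num : Int) (ids : List Int) : Prop :=
  0 ≤ total_num ∧ ids.Nodup ∧ ∀ x ∈ ids, 0 ≤ x ∧ x < total_num
instance (total_num : Int) (ids : List Int) : Decidable (Pre_excludedids total_num ids) := by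
  unfold Pre_excludedids; infer_instance

def pvWitness_excludedids : Int × List Int := (5, [3, 1])

def Spec_excludedids (total_num : Int) (ids : List Int) (out : List Int) : Prop :=
  out = excludedids_alt total_num ids
instance (total_num : Int) (ids : List Int) (out : List Int) : Decidable (Spec_excludedids total_num ids out) := by
  unfold Spec_excludedids; infer_instance

-- ===== CLAIM (what is proved, stated in full; the proofs are below) =====
def Claim_equal_excludedids : Prop := ∀ (total_num : Int) (ids : List Int),
  Dom_excludedids total_num ids → Pre_excludedids total_num ids →
  Spec_excludedids total_num ids (excludedids total_num ids)

-- ===== LEMMAS AND PROOFS =====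

-- The merge-loop invariant: after processing range n, the accumulator is the filtered range and
-- the pointer j is the length of the (unique) prefix t of s whose elements are < n.
lemma pvLoopA (s : List Int) (hs : s.Pairwise (· < ·)) (h0 : ∀ x ∈ s, 0 ≤ x) (n : Nat) :
    ∃ t d, s = t ++ d ∧ (∀ x ∈ t, x < (n : Int)) ∧ (∀ x ∈ d, (n : Int) ≤ x) ∧
      ((List.range n).map (Int.ofNat)).foldl (pvStepA s) ([], 0)
        = (((List.range n).map Int.ofNat).filter (fun i => !s.contains i), t.length) := by
  induction n with
  | zero => exact ⟨[], s, rfl, by simp, by simpa using h0, by simp⟩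
  | succ n ih =>
    obtain ⟨t, d, hsd, ht, hd, hfold⟩ := ih
    have hrange : (List.range (n+1)).map (Int.ofNat)
        = (List.range n).map Int.ofNat ++ [(n : Int)] := by
      simp [List.range_succ]
    cases d with
    | nil =>
      -- j = s.length: the else-branch appends n; n ∉ s since every element is < n
      have hts : t = s := by simpa using hsd.symm
      have hnmem : ¬ ((n:Int) ∈ s) := fun h => absurd (ht _ (hts ▸ h)) (by simp)
      refine ⟨t, [], hsd, fun x hx => lt_trans (ht x hx) (by exact_mod_cast Nat.lt_succ_self n),
        by simp, ?_⟩
      rw [hrange, List.foldl_append, hfold, List.filter_append]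
      have hj : t.length = s.length := by rw [hts]
      simp [pvStepA, hj, hnmem]
    | cons h dtl =>
      subst hsd
      have hlen : t.length < (t ++ h :: dtl).length := by simp
      have hget : (t ++ h :: dtl)[t.length]'hlen = h := by
        simp [List.getElem_append_right]
      have hhn : (n:Int) ≤ h := hd h (by simp)
      have hpair : ∀ x ∈ dtl, h < x := by
        have h1 := (List.pairwise_append.mp hs).2.1
        exact (List.pairwise_cons.mp h1).1
      by_cases heq : (n : Int) = h
      · -- match: j advances, n is in s, nothing appended
        have hnmem : (n:Int) ∈ t ++ h :: dtl := by rw [heq]; simp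
        refine ⟨t ++ [h], dtl, by simp, ?_, ?_, ?_⟩
        · intro x hx
          rcases List.mem_append.mp hx with hx | hx
          · exact lt_trans (ht x hx) (by exact_mod_cast Nat.lt_succ_self n)
          · simp at hx; subst hx; rw [← heq]; exact_mod_cast Nat.lt_succ_self n
        · intro x hx
          have h2 := hpair x hx
          have : (n:Int) < x := heq ▸ h2
          omega
        · rw [hrange, List.foldl_append, hfold, List.filter_append]
          simp [pvStepA, hget, heq]
      · -- no match: h > n, n not in s, n appended, j unchanged
        have hgt : (n:Int) < h := lt_of_le_of_ne hhn heq
        have hnmem : ¬ ((n:Int) ∈ t ++ h :: dtl) := by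
          intro hmem
          rcases List.mem_append.mp hmem with hm | hm
          · exact absurd (ht _ hm) (by simp)
          · rcases List.mem_cons.mp hm with hm | hm
            · exact heq hm
            · exact absurd (hpair _ hm) (by omega)
        refine ⟨t, h :: dtl, rfl, fun x hx => lt_trans (ht x hx) (by exact_mod_cast Nat.lt_succ_self n), ?_, ?_⟩
        · intro x hx
          rcases List.mem_cons.mp hx with hx | hx
          · subst hx; omega
          · have := hpair x hx; omega
        · simp only [List.mem_append, List.mem_cons, not_or] at hnmem
          rw [hrange, List.foldl_append, hfold, List.filter_append]
          simp [pvStepA, hget, heq, hnmem.1, hnmem.2.2]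

-- ===== VERDICT (by name: the statement is the Claim_ definition above) =====
theorem excludedids_spec : Claim_equal_excludedids := by
  intro total_num ids _hdom hpre
  obtain ⟨hnn, hnd, hbound⟩ := hpre
  unfold Spec_excludedids excludedids excludedids_alt
  set s := PySem.List.sorted ids (fun x => x) false with hs_def
  have hperm : s.Perm ids := PySem.List.sorted_perm ids (fun x => x) false
  have hmem : ∀ x, x ∈ s ↔ x ∈ ids := fun x => hperm.mem_iff
  have hnds : s.Nodup := hperm.nodup_iff.mpr hnd
  have hle : s.Pairwise (· ≤ ·) := by
    simpa using PySem.List.sorted_pairwise ids (fun x => x)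
  have hlt : s.Pairwise (· < ·) := by
    refine (hle.and hnds).imp ?_
    exact fun ⟨h1, h2⟩ => lt_of_le_of_ne h1 h2
  have h0 : ∀ x ∈ s, 0 ≤ x := fun x hx => (hbound x ((hmem x).mp hx)).1
  obtain ⟨n, hn⟩ := Int.eq_ofNat_of_zero_le hnn
  obtain ⟨t, d, _, _, _, hfold⟩ := pvLoopA s hlt h0 n
  have hrange : PySem.List.pyRange 0 total_num 1 = (List.range n).map Int.ofNat := by
    rw [hn, PySem.List.pyRange_one]
    simp
  rw [hrange]
  simp only [hfold]
  apply List.filter_congr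
  intro i _
  simp
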